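-- pv_equiv track=rewrite | github.com/charlesfranciscodev/codingame | puzzles/python3/scrabble/scrabble.py | find_max_score_word
-- ===== SOURCE A (Python) =====
-- from collections import Counter
-- from typing import Dict
-- from typing import List
-- from typing import Optional
--
-- def calculate_score(word: str, LETTER_POINTS: Dict[str, int]) -> int:
--     score = 0
--     for letter in word:
--         score += LETTER_POINTS.get(letter, 0)
--     return score
--
-- def find_max_score_word(dictionary: List[str], letters: str, LETTER_POINTS: Dict[str, int]) -> Optional[str]:
--     max_score = 0
--     max_score_word = None
--
--     for word in dictionary:
--         # Check if the word can be formed using the available letters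
--         letters_counter = Counter(letters)
--         word_counter = Counter(word)
--         if all(letters_counter[letter] >= count for letter, count in word_counter.items()):
--             score = calculate_score(word, LETTER_POINTS)
--             if score > max_score:
--                 max_score = score
--                 max_score_word = word
--
--     return max_score_word
-- ===== SOURCE B (Python) =====
-- from collections import Counter
--
--
-- def find_max_score_word(dictionary, letters, LETTER_POINTS):
--     available = Counter(letters)
--     # Score every word once, then stably sort by score descending
--     # (ties keep dictionary order).
--     ranked = sorted(
--         ((word, sum(LETTER_POINTS.get(ch, 0) for ch in word)) for word in dictionary),
--         key=lambda pair: pair[1],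
--         reverse=True,
--     )
--     # First formable word in the ranked order wins; scores <= 0 can never win.
--     for word, score in ranked:
--         if score <= 0:
--             return None
--         needed = Counter(word)
--         if all(available[ch] >= n for ch, n in needed.items()):
--             return word
--     return None
-- ===== Notes on version B (the rewrite author's own statement) =====
-- stated objective: alternative
-- what changed: Replaces A's running-max accumulator loop (which rebuilds Counter(letters) on every iteration) with: build the letter counter once, score every word, stably sort the (word, score) pairs by score descending, and return the first formable word scanning in that order, stopping as soon as scores drop to <= 0.
import Mathlib
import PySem

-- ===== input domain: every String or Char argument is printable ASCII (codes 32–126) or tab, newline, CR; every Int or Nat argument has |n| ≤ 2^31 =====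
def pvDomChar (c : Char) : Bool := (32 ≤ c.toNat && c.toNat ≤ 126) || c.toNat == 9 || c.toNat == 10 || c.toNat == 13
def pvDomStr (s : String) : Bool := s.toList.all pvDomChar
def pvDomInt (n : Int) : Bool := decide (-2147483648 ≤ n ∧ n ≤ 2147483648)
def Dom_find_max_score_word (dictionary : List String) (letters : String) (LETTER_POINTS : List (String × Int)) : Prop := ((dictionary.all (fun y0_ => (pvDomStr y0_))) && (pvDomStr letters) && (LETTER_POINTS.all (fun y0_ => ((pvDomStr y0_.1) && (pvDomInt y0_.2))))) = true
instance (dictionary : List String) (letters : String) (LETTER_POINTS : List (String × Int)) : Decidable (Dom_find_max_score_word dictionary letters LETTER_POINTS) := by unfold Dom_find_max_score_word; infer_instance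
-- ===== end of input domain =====

-- B replaces A's running-max accumulator (which rebuilds Counter(letters) every iteration)
-- by: build the counter once, score all words, stably sort by score descending, return the
-- first formable word in that order (scores <= 0 cut off the scan). Objective: alternative.

-- The Counter-subset test `all(letters_counter[l] >= c for l, c in Counter(word).items())`.
-- Python's Counter on a string has 1-char-string keys; Char keys carry the same counts, so
-- the comparison is exact. Shared by both ports (both Pythons perform this very test).
def pvCanForm (avail : PySem.Dict Char Int) (word : String) : Bool :=
  (PySem.Dict.counter word.toList).items.all (fun p => decide (p.2 ≤ avail.getD p.1 0))

-- ===== PORT A =====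
-- `score += LETTER_POINTS.get(letter, 0)` over the word's letters (dict lookup, default 0)
def calculate_score (word : String) (LETTER_POINTS : List (String × Int)) : Int :=
  word.toList.foldl
    (fun score letter => score + (PySem.Dict.mk LETTER_POINTS).getD (String.singleton letter) 0) 0

def find_max_score_word (dictionary : List String) (letters : String) (LETTER_POINTS : List (String × Int)) : Option String :=
  (dictionary.foldl
    (fun (acc : Int × Option String) word =>
      if pvCanForm (PySem.Dict.counter letters.toList) word then
        if acc.1 < calculate_score word LETTER_POINTS then (calculate_score word LETTER_POINTS, some word)
        else acc
      else acc)
    (0, none)).2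

-- ===== PORT B =====
-- `sum(LETTER_POINTS.get(ch, 0) for ch in word)`
def pvWordScore (LETTER_POINTS : List (String × Int)) (word : String) : Int :=
  (word.toList.map (fun ch => (PySem.Dict.mk LETTER_POINTS).getD (String.singleton ch) 0)).sum

-- the `for word, score in ranked:` loop of Source B (early `return None` once scores drop to <= 0)
def pvScanRanked (available : PySem.Dict Char Int) : List (String × Int) → Option String
  | [] => none
  | (word, score) :: rest =>
    if score ≤ 0 then none
    else if pvCanForm available word then some word
    else pvScanRanked available rest

def find_max_score_word_alt (dictionary : List String) (letters : String) (LETTER_POINTS : List (String × Int)) : Option String :=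
  let available := PySem.Dict.counter letters.toList
  let ranked := PySem.List.sorted (dictionary.map (fun word => (word, pvWordScore LETTER_POINTS word)))
      (fun pair => pair.2) true
  pvScanRanked available ranked

-- ===== PRECONDITION & SPEC =====
def Spec_find_max_score_word (dictionary : List String) (letters : String) (LETTER_POINTS : List (String × Int)) (out : Option String) : Prop := out = find_max_score_word_alt dictionary letters LETTER_POINTS
instance (dictionary : List String) (letters : String) (LETTER_POINTS : List (String × Int)) (out : Option String) : Decidable (Spec_find_max_score_word dictionary letters LETTER_POINTS out) := by unfold Spec_find_max_score_word; infer_instance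

-- ===== CLAIM (what is proved, stated in full; the proofs are below) =====
def Claim_equal_find_max_score_word : Prop := ∀ (dictionary : List String) (letters : String) (LETTER_POINTS : List (String × Int)), Dom_find_max_score_word dictionary letters LETTER_POINTS → Spec_find_max_score_word dictionary letters LETTER_POINTS (find_max_score_word dictionary letters LETTER_POINTS)

-- ===== LEMMAS AND PROOFS =====

-- max score of a formable pair in L (0 if none): the value A's accumulator tracks
def pvMaxP (avail : PySem.Dict Char Int) : List (String × Int) → Int
  | [] => 0
  | (w, s) :: t => if pvCanForm avail w then max s (pvMaxP avail t) else pvMaxP avail t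

theorem pvMaxP_nonneg (a : PySem.Dict Char Int) (L : List (String × Int)) : 0 ≤ pvMaxP a L := by
  induction L with
  | nil => simp [pvMaxP]
  | cons p t ih => obtain ⟨w, s⟩ := p; simp only [pvMaxP]; split <;> omega

theorem pvMaxP_lt (a : PySem.Dict Char Int) (L : List (String × Int)) (c : Int)
    (h0 : 0 < c) (h : ∀ p ∈ L, p.2 < c) : pvMaxP a L < c := by
  induction L with
  | nil => simpa [pvMaxP]
  | cons p t ih =>
    obtain ⟨w, s⟩ := p
    have hs : s < c := h (w, s) (by simp)
    have ht := ih (fun p hp => h p (List.mem_cons_of_mem _ hp))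
    simp only [pvMaxP]; split <;> omega

theorem pvMaxP_eq_foldr (a : PySem.Dict Char Int) (L : List (String × Int)) :
    pvMaxP a L = L.foldr (fun p r => if pvCanForm a p.1 then max p.2 r else r) 0 := by
  induction L with
  | nil => rfl
  | cons p t ih => obtain ⟨w, s⟩ := p; simp [pvMaxP, ih]

theorem pvMaxP_perm (a : PySem.Dict Char Int) {L L' : List (String × Int)} (h : L.Perm L') :
    pvMaxP a L = pvMaxP a L' := by
  rw [pvMaxP_eq_foldr, pvMaxP_eq_foldr]
  exact @List.Perm.foldr_eq _ _ _ _ _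
    ⟨fun x y z => by
      by_cases h1 : pvCanForm a x.1 <;> by_cases h2 : pvCanForm a y.1 <;>
        simp [h1, h2, max_left_comm]⟩ h 0

theorem pvMaxP_append_singleton (a : PySem.Dict Char Int) (L : List (String × Int)) (w : String) (s : Int) :
    pvMaxP a (L ++ [(w, s)]) = if pvCanForm a w then max (pvMaxP a L) s else pvMaxP a L := by
  induction L with
  | nil => simp only [List.nil_append, pvMaxP]; split <;> omega
  | cons p t ih =>
    obtain ⟨v, u⟩ := p
    simp only [List.cons_append, pvMaxP, ih]
    split <;> split <;> omega

theorem pvScan_cons (a : PySem.Dict Char Int) (w : String) (s : Int) (t : List (String × Int)) :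
    pvScanRanked a ((w, s) :: t)
      = if s ≤ 0 then none else if pvCanForm a w then some w else pvScanRanked a t := rfl

-- the heart: inserting a new scored word into a score-descending list, then scanning,
-- is A's strict-improvement update of the scan result of the old list
theorem pvScan_insert (a : PySem.Dict Char Int) (L : List (String × Int))
    (hs : L.Pairwise (fun p q => q.2 ≤ p.2)) (w : String) (s : Int) :
    pvScanRanked a (PySem.List.insertBy (fun p q => decide (q.2 < p.2)) (w, s) L)
      = if pvCanForm a w = true ∧ pvMaxP a L < s then some w else pvScanRanked a L := by
  induction L with
  | nil =>
    simp only [PySem.List.insertBy, pvScan_cons, pvMaxP, pvScanRanked]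
    by_cases h0 : s ≤ 0
    · rw [if_pos h0, if_neg (by omega)]
    · rw [if_neg h0]
      by_cases hf : pvCanForm a w
      · rw [if_pos hf, if_pos ⟨hf, by omega⟩]
      · rw [if_neg hf, if_neg (fun h => hf h.1)]
  | cons p t ih =>
    obtain ⟨v, u⟩ := p
    have htail : ∀ q ∈ t, q.2 ≤ u := (List.pairwise_cons.mp hs).1
    have hst := (List.pairwise_cons.mp hs).2
    have hMnn := pvMaxP_nonneg a ((v, u) :: t)
    have hMcons : pvMaxP a ((v, u) :: t)
        = if pvCanForm a v then max u (pvMaxP a t) else pvMaxP a t := rfl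
    simp only [PySem.List.insertBy]
    by_cases hb : u < s
    · rw [if_pos (by simpa using hb)]
      rw [pvScan_cons]
      by_cases h0 : s ≤ 0
      · rw [if_pos h0, if_neg (by omega), pvScan_cons, if_pos (by omega)]
      · rw [if_neg h0]
        by_cases hf : pvCanForm a w
        · have hlt : pvMaxP a ((v, u) :: t) < s := by
            refine pvMaxP_lt a _ s (by omega) ?_
            intro q hq
            rcases List.mem_cons.mp hq with h | h
            · rw [h]; exact hb
            · exact lt_of_le_of_lt (htail q h) hb
          rw [if_pos hf, if_pos ⟨hf, hlt⟩]
        · rw [if_neg hf, if_neg (fun h => hf h.1)]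
    · rw [if_neg (by simpa using hb)]
      have hsu : s ≤ u := by omega
      rw [pvScan_cons, pvScan_cons]
      by_cases h0 : u ≤ 0
      · rw [if_pos h0, if_pos h0, if_neg (by omega)]
      · rw [if_neg h0, if_neg h0]
        by_cases hfv : pvCanForm a v
        · have hge : s ≤ pvMaxP a ((v, u) :: t) := by rw [hMcons, if_pos hfv]; omega
          rw [if_pos hfv, if_pos hfv, if_neg (by omega)]
        · have hMt : pvMaxP a ((v, u) :: t) = pvMaxP a t := by rw [hMcons, if_neg hfv]
          rw [if_neg hfv, if_neg hfv, ih hst, hMt]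

-- A's whole fold computes (max formable score, scan of the descending sort)
theorem pvMain (a : PySem.Dict Char Int) (f : String → Int) (ws : List String) :
    ws.foldl
      (fun (acc : Int × Option String) word =>
        if pvCanForm a word then
          if acc.1 < f word then (f word, some word) else acc
        else acc)
      (0, none)
      = (pvMaxP a (ws.map (fun w => (w, f w))),
         pvScanRanked a (PySem.List.sorted (ws.map (fun w => (w, f w))) (fun p => p.2) true)) := by
  induction ws using List.reverseRecOn with
  | nil => simp [pvMaxP, PySem.List.sorted, pvScanRanked]
  | append_singleton ws w ih =>
    rw [List.foldl_append, ih, List.map_append]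
    have hsort : PySem.List.sorted (ws.map (fun w => (w, f w)) ++ [(w, f w)]) (fun p => p.2) true
        = PySem.List.insertBy (fun p q => decide (q.2 < p.2)) (w, f w)
            (PySem.List.sorted (ws.map (fun w => (w, f w))) (fun p => p.2) true) := by
      rw [PySem.List.sorted_rev_eq_foldl_insertBy, PySem.List.sorted_rev_eq_foldl_insertBy,
        List.foldl_append]
      rfl
    rw [List.map_cons, List.map_nil, hsort,
      pvScan_insert a _ (PySem.List.sorted_pairwise_rev _ _) w (f w),
      pvMaxP_append_singleton,
      pvMaxP_perm a (PySem.List.sorted_perm (ws.map (fun w => (w, f w))) (fun p => p.2) true)]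
    simp only [List.foldl_cons, List.foldl_nil]
    by_cases hf : pvCanForm a w
    · by_cases hlt : pvMaxP a (ws.map (fun w => (w, f w))) < f w
      · rw [if_pos hf, if_pos hlt, if_pos (⟨hf, hlt⟩ : _ ∧ _), max_eq_right hlt.le]
        simp [hf]
      · rw [if_pos hf, if_neg hlt, if_neg (fun (h : _ ∧ _) => hlt h.2),
          max_eq_left (not_lt.mp hlt)]
        simp [hf]
    · rw [if_neg hf, if_neg (fun (h : _ ∧ _) => hf h.1)]
      simp [hf]

theorem calculate_score_eq (word : String) (LP : List (String × Int)) :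
    calculate_score word LP = pvWordScore LP word := by
  unfold calculate_score pvWordScore
  rw [PySem.List.foldl_add]
  omega

-- ===== VERDICT (by name: the statement is the Claim_ definition above) =====
theorem find_max_score_word_spec : Claim_equal_find_max_score_word := by
  intro dictionary letters LETTER_POINTS _
  show find_max_score_word dictionary letters LETTER_POINTS
      = find_max_score_word_alt dictionary letters LETTER_POINTS
  unfold find_max_score_word find_max_score_word_alt
  rw [pvMain (PySem.Dict.counter letters.toList)
      (fun w => calculate_score w LETTER_POINTS) dictionary]
  simp only [calculate_score_eq]
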